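-- pv_equiv track=rewrite | github.com/LimEkhNyok/ai-recruit-agent | backend/app/services/capability_test.py | get_available_features
-- ===== SOURCE A (Python) =====
-- FEATURE_REQUIREMENTS = {
--     "assessment": ["chat"],
--     "matching": ["chat"],
--     "interview": ["chat", "stream"],
--     "career": ["chat"],
--     "resume": ["chat"],
--     "quiz": ["chat"],
-- }
--
-- def get_available_features(
--     supports_chat: bool,
--     supports_stream: bool,
--     supports_json: bool,
--     supports_embedding: bool,
-- ) -> dict[str, bool]:
--     caps = {
--         "chat": supports_chat,
--         "stream": supports_stream,
--     }
--     return {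
--         feature: all(caps.get(req, False) for req in reqs)
--         for feature, reqs in FEATURE_REQUIREMENTS.items()
--     }
-- ===== SOURCE B (Python) =====
-- def get_available_features(
--     supports_chat: bool,
--     supports_stream: bool,
--     supports_json: bool,
--     supports_embedding: bool,
-- ) -> dict[str, bool]:
--     return {
--         "assessment": supports_chat,
--         "matching": supports_chat,
--         "interview": supports_chat and supports_stream,
--         "career": supports_chat,
--         "resume": supports_chat,
--         "quiz": supports_chat,
--     }
-- ===== Notes on version B (the rewrite author's own statement) =====
-- stated objective: simpler
-- what changed: Replaced the FEATURE_REQUIREMENTS table, the caps dict and the comprehension with all() by a single explicit dict literal mapping each feature directly to its boolean expression.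
import Mathlib
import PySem

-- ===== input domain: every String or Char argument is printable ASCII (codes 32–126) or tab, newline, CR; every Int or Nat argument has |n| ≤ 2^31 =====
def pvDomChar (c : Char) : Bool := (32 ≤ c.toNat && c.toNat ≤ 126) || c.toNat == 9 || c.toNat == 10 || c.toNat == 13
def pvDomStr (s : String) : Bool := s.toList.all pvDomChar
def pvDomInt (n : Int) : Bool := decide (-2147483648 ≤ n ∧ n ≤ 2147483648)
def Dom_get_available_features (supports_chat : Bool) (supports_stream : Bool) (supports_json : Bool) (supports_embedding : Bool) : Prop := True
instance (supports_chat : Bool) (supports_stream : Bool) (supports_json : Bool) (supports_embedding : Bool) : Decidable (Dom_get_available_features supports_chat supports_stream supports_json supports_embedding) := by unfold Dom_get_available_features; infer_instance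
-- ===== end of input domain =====

-- B replaces A's requirements table + comprehension by one explicit dict literal (simpler decomposition).

-- ===== PORT A =====
def FEATURE_REQUIREMENTS : PySem.Dict String (List String) :=
  PySem.Dict.ofList
    [("assessment", ["chat"]), ("matching", ["chat"]), ("interview", ["chat", "stream"]),
     ("career", ["chat"]), ("resume", ["chat"]), ("quiz", ["chat"])]

def get_available_features (supports_chat : Bool) (supports_stream : Bool) (supports_json : Bool) (supports_embedding : Bool) : List (String × Bool) :=
  let caps : PySem.Dict String Bool := PySem.Dict.ofList [("chat", supports_chat), ("stream", supports_stream)]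
  ((PySem.Dict.items FEATURE_REQUIREMENTS).foldl
    (fun acc fr => PySem.Dict.insert acc fr.1 (fr.2.all (fun req => PySem.Dict.getD caps req false)))
    PySem.Dict.empty).items

-- ===== PORT B =====
def get_available_features_alt (supports_chat : Bool) (supports_stream : Bool) (supports_json : Bool) (supports_embedding : Bool) : List (String × Bool) :=
  [("assessment", supports_chat), ("matching", supports_chat),
   ("interview", supports_chat && supports_stream),
   ("career", supports_chat), ("resume", supports_chat), ("quiz", supports_chat)]

-- ===== PRECONDITION & SPEC =====
def Spec_get_available_features (supports_chat : Bool) (supports_stream : Bool) (supports_json : Bool) (supports_embedding : Bool) (out : List (String × Bool)) : Prop := out = get_available_features_alt supports_chat supports_stream supports_json supports_embedding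
instance (supports_chat : Bool) (supports_stream : Bool) (supports_json : Bool) (supports_embedding : Bool) (out : List (String × Bool)) : Decidable (Spec_get_available_features supports_chat supports_stream supports_json supports_embedding out) := by unfold Spec_get_available_features; infer_instance

-- ===== CLAIM (what is proved, stated in full; the proofs are below) =====
def Claim_equal_get_available_features : Prop := ∀ (supports_chat : Bool) (supports_stream : Bool) (supports_json : Bool) (supports_embedding : Bool), Dom_get_available_features supports_chat supports_stream supports_json supports_embedding → Spec_get_available_features supports_chat supports_stream supports_json supports_embedding (get_available_features supports_chat supports_stream supports_json supports_embedding)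

-- ===== LEMMAS AND PROOFS =====

-- ===== VERDICT (by name: the statement is the Claim_ definition above) =====
theorem get_available_features_spec : Claim_equal_get_available_features := by
  intro c s j e _
  cases c <;> cases s <;> rfl
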